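-- pv_equiv track=rewrite | github.com/wongsitu/crehana_challenge | case1.py | sortByWeight
-- ===== SOURCE A (Python) =====
-- weights = '56 65 74 100 99 68 86 180 90'
--
-- def sumOfDigit(n):
--     sum = 0
--     while (n > 0):
--         sum += n % 10
--         n = n // 10
--     return sum
--
-- def takeFirst(elem):
--     return elem[0]
--
-- def sortByWeight (string):
--     if weights:
--         weigths_hashmap = [] #sum_weigth : weigth
--         weights_string = ''
--         weights_array = string.split(' ')
--         for weight in weights_array:
--             weigths_hashmap.append((sumOfDigit(int(weight)),weight))
--         weigths_hashmap.sort(key = takeFirst)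
--         for element in weigths_hashmap:
--             weights_string += element[1] + ' '
--         return weights_string
--     else:
--         return 'no weigths submitted'
-- ===== SOURCE B (Python) =====
-- weights = '56 65 74 100 99 68 86 180 90'
--
-- def sumOfDigit(n):
--     sum = 0
--     while (n > 0):
--         sum += n % 10
--         n = n // 10
--     return sum
--
-- def sortByWeight(string):
--     if weights:
--         buckets = {}
--         for token in string.split(' '):
--             buckets.setdefault(sumOfDigit(int(token)), []).append(token)
--         out = ''
--         for key in sorted(buckets):
--             for token in buckets[key]:
--                 out += token + ' '
--         return out
--     else:
--         return 'no weigths submitted'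
-- ===== Notes on version B (the rewrite author's own statement) =====
-- stated objective: alternative
-- what changed: Replaces build-pairs-then-comparison-sort with a stable bucket sort: tokens are grouped in a dict keyed by digit-sum in encounter order, then buckets are emitted in ascending key order.
import Mathlib
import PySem

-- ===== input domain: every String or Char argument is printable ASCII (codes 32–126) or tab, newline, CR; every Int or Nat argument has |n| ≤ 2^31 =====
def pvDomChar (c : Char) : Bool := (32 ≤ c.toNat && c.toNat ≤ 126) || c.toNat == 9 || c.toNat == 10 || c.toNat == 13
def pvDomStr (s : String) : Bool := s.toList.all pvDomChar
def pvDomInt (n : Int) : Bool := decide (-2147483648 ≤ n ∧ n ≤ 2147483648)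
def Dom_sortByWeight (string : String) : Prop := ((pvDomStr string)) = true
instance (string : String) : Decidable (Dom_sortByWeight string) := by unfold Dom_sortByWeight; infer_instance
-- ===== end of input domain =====

-- B replaces build-pairs-then-stable-sort by a stable bucket sort (dict keyed by digit-sum,
-- buckets emitted in ascending key order); equal return value on every input A accepts.

-- the module constant `weights` (same in both sources)
def pvWeights : String := "56 65 74 100 99 68 86 180 90"

-- sumOfDigit, the helper shared verbatim by both Python sources
def sumOfDigitLoop (n sum : Int) : Int :=
  if 0 < n then sumOfDigitLoop (PySem.Int.floordiv n 10) (sum + PySem.Int.mod n 10) else sum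
termination_by n.toNat
decreasing_by
  have h10 : (0:Int) < 10 := by norm_num
  rw [PySem.Int.floordiv_eq_ediv_of_pos h10]; omega

def sumOfDigit (n : Int) : Int := sumOfDigitLoop n 0

-- int(w), total form used under Pre_ (Pre_ guarantees ofStr? is some on every token)
def pvInt (w : String) : Int := (PySem.Int.ofStr? w).getD 0

-- ===== PORT A =====
def sortByWeight (string : String) : String :=
  if pvWeights.toList ≠ [] then
    let weights_array := (PySem.Str.split? string " ").getD []
    let weigths_hashmap :=
      weights_array.foldl (fun acc weight => acc ++ [(sumOfDigit (pvInt weight), weight)]) []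
    let sortedMap := PySem.List.sorted weigths_hashmap (fun elem => elem.1)
    String.ofList (sortedMap.foldl (fun acc element => acc ++ element.2.toList ++ [' ']) [])
  else "no weigths submitted"

-- ===== PORT B =====
def sortByWeight_alt (string : String) : String :=
  if pvWeights.toList ≠ [] then
    let buckets :=
      ((PySem.Str.split? string " ").getD []).foldl
        (fun d token => d.modify (sumOfDigit (pvInt token)) [] (fun l => l ++ [token]))
        PySem.Dict.empty
    let ks := PySem.List.sorted buckets.keys (fun k => k)
    String.ofList (ks.foldl
      (fun acc key => (buckets.getD key []).foldl (fun a token => a ++ token.toList ++ [' ']) acc) [])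
  else "no weigths submitted"

-- ===== PRECONDITION & SPEC =====
-- Pre_ excludes exactly the inputs where Python's int(token) raises ValueError on some token
-- of the single-space split (empty or non-numeric tokens): A raises there, returns nowhere else.
def Pre_sortByWeight (string : String) : Prop :=
  ((PySem.Str.split? string " ").getD []).all (fun w => (PySem.Int.ofStr? w).isSome) = true
instance (string : String) : Decidable (Pre_sortByWeight string) := by
  unfold Pre_sortByWeight; infer_instance

def pvWitness_sortByWeight : String := "12 345 6 78 90"

def Spec_sortByWeight (string : String) (out : String) : Prop := out = sortByWeight_alt string
instance (string : String) (out : String) : Decidable (Spec_sortByWeight string out) := by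
  unfold Spec_sortByWeight; infer_instance

-- ===== CLAIM (what is proved, stated in full; the proofs are below) =====
def Claim_equal_sortByWeight : Prop := ∀ (string : String), Dom_sortByWeight string → Pre_sortByWeight string → Spec_sortByWeight string (sortByWeight string)

-- ===== LEMMAS AND PROOFS =====

def pvKeyF (w : String) : Int := sumOfDigit (pvInt w)

-- inserting x between a prefix it must pass and a suffix it must precede
theorem insertBy_middle {α : Type} (before : α → α → Bool) (x : α) (as bs : List α)
    (ha : ∀ a ∈ as, before x a = false) (hb : ∀ b ∈ bs, before x b = true) :
    PySem.List.insertBy before x (as ++ bs) = as ++ x :: bs := by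
  induction as with
  | nil =>
    cases bs with
    | nil => simp [PySem.List.insertBy]
    | cons b bs => simp [PySem.List.insertBy, hb b (by simp)]
  | cons a as ih =>
    simp only [List.cons_append, PySem.List.insertBy, ha a (by simp)]
    simp only [Bool.false_eq_true, if_false, List.cons.injEq, true_and]
    exact ih (fun a h => ha a (by simp [h]))

-- one fold step of the insertion sort: sorting xs ++ [y] inserts y into sorted xs
theorem sorted_append_singleton {α κ : Type} [LinearOrder κ] (xs : List α) (key : α → κ) (y : α) :
    PySem.List.sorted (xs ++ [y]) key =
      PySem.List.insertBy (fun a b => decide (key a < key b)) y (PySem.List.sorted xs key) := by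
  rw [PySem.List.sorted_eq_foldl_insertBy, PySem.List.sorted_eq_foldl_insertBy, List.foldl_append]
  rfl

-- appending one element: PySem.Set.ofList grows at the back or not at all
theorem ofList_append_singleton {α : Type} [BEq α] (ys : List α) (a : α) :
    PySem.Set.ofList (ys ++ [a]) =
      if (PySem.Set.ofList ys).contains a then PySem.Set.ofList ys
      else PySem.Set.ofList ys ++ [a] := by
  simp [PySem.Set.ofList, List.foldl_append, PySem.Set.add]

-- splitting a strictly increasing list at a value not in it
theorem split_of_not_mem (K : List Int) (j : Int) (hK : K.Pairwise (· < ·)) (hj : j ∉ K) :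
    ∃ as bs, K = as ++ bs ∧ (∀ a ∈ as, a < j) ∧ (∀ b ∈ bs, j < b) := by
  induction K with
  | nil => exact ⟨[], [], rfl, by simp, by simp⟩
  | cons k K ih =>
    rcases lt_trichotomy k j with h | h | h
    · obtain ⟨as, bs, heq, ha, hb⟩ :=
        ih (List.pairwise_cons.mp hK).2 (fun hm => hj (List.mem_cons_of_mem _ hm))
      refine ⟨k :: as, bs, by rw [heq, List.cons_append], ?_, hb⟩
      intro a haa; rcases List.mem_cons.mp haa with rfl | haa
      · exact h
      · exact ha a haa
    · exact absurd (h ▸ List.mem_cons_self) hj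
    · refine ⟨[], k :: K, rfl, by simp, ?_⟩
      intro b hbb; rcases List.mem_cons.mp hbb with rfl | hbb
      · exact h
      · exact h.trans ((List.pairwise_cons.mp hK).1 b hbb)

-- splitting a strictly increasing list at a value in it
theorem split_of_mem (K : List Int) (j : Int) (hK : K.Pairwise (· < ·)) (hj : j ∈ K) :
    ∃ as bs, K = as ++ j :: bs ∧ (∀ a ∈ as, a < j) ∧ (∀ b ∈ bs, j < b) := by
  induction K with
  | nil => cases hj
  | cons k K ih =>
    rcases List.mem_cons.mp hj with rfl | hj'
    · exact ⟨[], K, rfl, by simp, (List.pairwise_cons.mp hK).1⟩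
    · obtain ⟨as, bs, heq, ha, hb⟩ := ih (List.pairwise_cons.mp hK).2 hj'
      refine ⟨k :: as, bs, by rw [heq, List.cons_append], ?_, hb⟩
      intro a haa; rcases List.mem_cons.mp haa with rfl | haa
      · exact (List.pairwise_cons.mp hK).1 j hj'
      · exact ha a haa

-- every element of the k-bucket has key k
theorem mem_bucket_key {β : Type} (l : List (Int × β)) (k : Int) (p : Int × β)
    (hp : p ∈ l.filter (fun p => p.1 == k)) : p.1 = k := by
  have := (List.mem_filter.mp hp).2
  simpa using this

-- the crux: stable sort by key = concatenation of the key-buckets in ascending key order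
theorem sorted_key_eq_flatMap_filter {β : Type} (l : List (Int × β)) :
    PySem.List.sorted l (fun p => p.1) =
      (PySem.List.sorted (PySem.Set.ofList (l.map (fun p => p.1))) (fun k => k)).flatMap
        (fun k => l.filter (fun p => p.1 == k)) := by
  induction l using List.reverseRecOn with
  | nil => rfl
  | append_singleton l x ih =>
    have hKpair : (PySem.List.sorted (PySem.Set.ofList (l.map (fun p => p.1))) (fun k => k)).Pairwise (· < ·) :=
      PySem.List.sorted_ofList_pairwise_lt _
    set K := PySem.List.sorted (PySem.Set.ofList (l.map (fun p => p.1))) (fun k => k) with hKdef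
    have hmemK : ∀ k, k ∈ K ↔ k ∈ l.map (fun p => p.1) := by
      intro k; rw [hKdef, PySem.List.mem_sorted, PySem.Set.mem_ofList]
    have hmap : (l ++ [x]).map (fun p : Int × β => p.1) = l.map (fun p => p.1) ++ [x.1] := by
      simp
    have hfilter : ∀ k, (l ++ [x]).filter (fun p => p.1 == k) =
        l.filter (fun p => p.1 == k) ++ (if x.1 = k then [x] else []) := by
      intro k
      rw [List.filter_append]
      congr 1
      by_cases h : x.1 = k <;> simp [h]
    rw [sorted_append_singleton, ih]
    by_cases hj : x.1 ∈ l.map (fun p : Int × β => p.1)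
    · -- key already present: key list unchanged, x appended to its bucket
      have hset : PySem.Set.ofList ((l ++ [x]).map (fun p : Int × β => p.1)) =
          PySem.Set.ofList (l.map (fun p => p.1)) := by
        rw [hmap, ofList_append_singleton, if_pos]
        simp [PySem.Set.mem_ofList, hj]
      rw [hmap] at hset
      obtain ⟨as, bs, hKsplit, ha, hb⟩ := split_of_mem K x.1 hKpair ((hmemK x.1).mpr hj)
      have hins : PySem.List.insertBy (fun a b => decide (a.1 < b.1)) x
            (K.flatMap (fun k => l.filter (fun p => p.1 == k))) =
          as.flatMap (fun k => l.filter (fun p => p.1 == k)) ++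
            (l.filter (fun p => p.1 == x.1) ++
              (x :: bs.flatMap (fun k => l.filter (fun p => p.1 == k)))) := by
        rw [hKsplit]
        simp only [List.flatMap_append, List.flatMap_cons]
        rw [← List.append_assoc]
        rw [insertBy_middle]
        · simp
        · intro p hp
          rcases List.mem_append.mp hp with hp | hp
          · obtain ⟨a, haa, hpa⟩ := List.mem_flatMap.mp hp
            have := mem_bucket_key l a p hpa
            simp [this]
            exact le_of_lt (ha a haa)
          · have := mem_bucket_key l x.1 p hp
            simp [this]
        · intro p hp
          obtain ⟨b, hbb, hpb⟩ := List.mem_flatMap.mp hp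
          have := mem_bucket_key l b p hpb
          simp [this]
          exact hb b hbb
      rw [hins, hmap, hset, ← hKdef, hKsplit]
      simp only [List.flatMap_append, List.flatMap_cons]
      have has : as.flatMap (fun k => (l ++ [x]).filter (fun p => p.1 == k)) =
          as.flatMap (fun k => l.filter (fun p => p.1 == k)) := by
        apply List.flatMap_congr
        intro a haa
        rw [hfilter a, if_neg (by exact ne_of_gt (ha a haa)), List.append_nil]
      have hbs : bs.flatMap (fun k => (l ++ [x]).filter (fun p => p.1 == k)) =
          bs.flatMap (fun k => l.filter (fun p => p.1 == k)) := by
        apply List.flatMap_congr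
        intro b hbb
        rw [hfilter b, if_neg (by exact ne_of_lt (hb b hbb)), List.append_nil]
      rw [has, hbs, hfilter x.1, if_pos rfl]
      simp
    · -- new key: it is inserted into the key list, with bucket [x]
      have hset : PySem.Set.ofList ((l ++ [x]).map (fun p : Int × β => p.1)) =
          PySem.Set.ofList (l.map (fun p => p.1)) ++ [x.1] := by
        rw [hmap, ofList_append_singleton, if_neg]
        simp [PySem.Set.mem_ofList, hj]
      obtain ⟨as, bs, hKsplit, ha, hb⟩ := split_of_not_mem K x.1 hKpair (fun h => hj ((hmemK x.1).mp h))
      have hK' : PySem.List.sorted (PySem.Set.ofList ((l ++ [x]).map (fun p : Int × β => p.1))) (fun k => k) =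
          as ++ x.1 :: bs := by
        rw [hset]
        rw [show PySem.Set.ofList (l.map (fun p : Int × β => p.1)) ++ [x.1] =
            (PySem.Set.ofList (l.map (fun p : Int × β => p.1)) : List Int) ++ [x.1] from rfl]
        rw [sorted_append_singleton, ← hKdef, hKsplit, insertBy_middle]
        · intro a haa; simp [not_lt.mpr (le_of_lt (ha a haa))]
        · intro b hbb; simp [hb b hbb]
      have hbx : l.filter (fun p => p.1 == x.1) = [] := by
        rw [List.filter_eq_nil_iff]
        intro p hp hpx
        exact hj (List.mem_map.mpr ⟨p, hp, by simpa using hpx⟩)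
      have hins : PySem.List.insertBy (fun a b => decide (a.1 < b.1)) x
            (K.flatMap (fun k => l.filter (fun p => p.1 == k))) =
          as.flatMap (fun k => l.filter (fun p => p.1 == k)) ++
            (x :: bs.flatMap (fun k => l.filter (fun p => p.1 == k))) := by
        rw [hKsplit]
        simp only [List.flatMap_append]
        rw [insertBy_middle]
        · intro p hp
          obtain ⟨a, haa, hpa⟩ := List.mem_flatMap.mp hp
          have := mem_bucket_key l a p hpa
          simp [this]
          exact le_of_lt (ha a haa)
        · intro p hp
          obtain ⟨b, hbb, hpb⟩ := List.mem_flatMap.mp hp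
          have := mem_bucket_key l b p hpb
          simp [this]
          exact hb b hbb
      rw [hins, hK']
      simp only [List.flatMap_append, List.flatMap_cons]
      have has : as.flatMap (fun k => (l ++ [x]).filter (fun p => p.1 == k)) =
          as.flatMap (fun k => l.filter (fun p => p.1 == k)) := by
        apply List.flatMap_congr
        intro a haa
        rw [hfilter a, if_neg (by exact ne_of_gt (ha a haa)), List.append_nil]
      have hbs : bs.flatMap (fun k => (l ++ [x]).filter (fun p => p.1 == k)) =
          bs.flatMap (fun k => l.filter (fun p => p.1 == k)) := by
        apply List.flatMap_congr
        intro b hbb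
        rw [hfilter b, if_neg (by exact ne_of_lt (hb b hbb)), List.append_nil]
      rw [has, hbs, hfilter x.1, if_pos rfl, hbx]
      simp

-- ===== VERDICT (by name: the statement is the Claim_ definition above) =====
theorem sortByWeight_spec : Claim_equal_sortByWeight := by
  intro string _hdom _hpre
  unfold Spec_sortByWeight sortByWeight sortByWeight_alt
  have hw : pvWeights.toList ≠ [] := by decide
  rw [if_pos hw, if_pos hw]
  set toks := (PySem.Str.split? string " ").getD [] with htoks
  set pairs := toks.map (fun w => (pvKeyF w, w)) with hpairs
  -- A's pair-building loop is pairs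
  have hhm : toks.foldl (fun acc weight => acc ++ [(sumOfDigit (pvInt weight), weight)]) [] = pairs := by
    rw [PySem.List.foldl_append_singleton_eq_map (fun w => (sumOfDigit (pvInt w), w)) toks []]
    rfl
  -- B's dict
  set d := toks.foldl
      (fun d token => d.modify (sumOfDigit (pvInt token)) [] (fun l => l ++ [token]))
      (PySem.Dict.empty) with hd
  have hdkeys : d.keys = PySem.Set.ofList (pairs.map (fun p => p.1)) := by
    rw [hd]
    have := PySem.Dict.keys_foldl_modify_key (κ := Int) (ν := List String) toks pvKeyF []
      (fun _ token l => l ++ [token]) PySem.Dict.empty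
    rw [show (fun (d : PySem.Dict Int (List String)) token =>
        d.modify (sumOfDigit (pvInt token)) [] (fun l => l ++ [token])) =
        (fun d token => d.modify (pvKeyF token) [] ((fun _ token l => l ++ [token]) d token)) from rfl]
    rw [this]
    rw [hpairs, List.map_map]
    rfl
  have hdgetD : ∀ k, d.getD k [] = (pairs.filter (fun p => p.1 == k)).map (fun p => p.2) := by
    intro k
    have h1 : pairs.foldl (fun d p => d.modify p.1 [] (fun l => l ++ [p.2])) PySem.Dict.empty = d := by
      rw [hpairs, List.foldl_map]
      rfl
    rw [← h1, PySem.Dict.getD_foldl_modify_append, PySem.Dict.getD_empty]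
    rfl
  -- both character lists as flatMaps
  have hAfold : ∀ (ys : List (Int × String)) (acc : List Char),
      ys.foldl (fun acc element => acc ++ element.2.toList ++ [' ']) acc =
        acc ++ ys.flatMap (fun e => e.2.toList ++ [' ']) := by
    intro ys acc
    rw [show (fun (acc : List Char) (element : Int × String) => acc ++ element.2.toList ++ [' ']) =
        (fun acc element => acc ++ (element.2.toList ++ [' '])) from by
      funext a e; rw [List.append_assoc]]
    exact PySem.List.foldl_append_eq_flatMap _ ys acc
  have hBinner : ∀ (ws : List String) (acc : List Char),
      ws.foldl (fun a token => a ++ token.toList ++ [' ']) acc =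
        acc ++ ws.flatMap (fun w => w.toList ++ [' ']) := by
    intro ws acc
    rw [show (fun (a : List Char) (token : String) => a ++ token.toList ++ [' ']) =
        (fun a token => a ++ (token.toList ++ [' '])) from by
      funext a t; rw [List.append_assoc]]
    exact PySem.List.foldl_append_eq_flatMap _ ws acc
  have hBfold : (PySem.List.sorted d.keys (fun k => k)).foldl
      (fun acc key => (d.getD key []).foldl (fun a token => a ++ token.toList ++ [' ']) acc) [] =
      (PySem.List.sorted d.keys (fun k => k)).flatMap
        (fun k => (d.getD k []).flatMap (fun w => w.toList ++ [' '])) := by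
    rw [show (fun (acc : List Char) key =>
        (d.getD key []).foldl (fun a token => a ++ token.toList ++ [' ']) acc) =
        (fun acc key => acc ++ (d.getD key []).flatMap (fun w => w.toList ++ [' '])) from by
      funext acc k; rw [hBinner]]
    rw [PySem.List.foldl_append_eq_flatMap, List.nil_append]
  have hmain : (PySem.List.sorted
        (toks.foldl (fun acc weight => acc ++ [(sumOfDigit (pvInt weight), weight)]) [])
        (fun elem => elem.1)).foldl (fun acc element => acc ++ element.2.toList ++ [' ']) [] =
      (PySem.List.sorted d.keys (fun k => k)).foldl
        (fun acc key => (d.getD key []).foldl (fun a token => a ++ token.toList ++ [' ']) acc) [] := by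
    rw [hhm, hAfold, List.nil_append, hBfold, hdkeys, sorted_key_eq_flatMap_filter pairs,
      List.flatMap_assoc]
    apply List.flatMap_congr
    intro k _
    rw [hdgetD k, List.flatMap_map]
  exact congrArg String.ofList hmain
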